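-- pv_equiv track=rewrite | github.com/jojoaddress/LeetCode-Solutions | Python/LeetCode/Trie/SplitString.py | partitionString2
-- ===== SOURCE A (Python) =====
-- from typing import List
--
-- def partitionString2(s: str) -> List[str]:
--     res = []
--     cur = root = {}
--     left = 0
--     for i,c in enumerate(s):
--         if c not in cur:
--             cur[c] = {}
--             res.append(s[left:i+1])
--             left = i+1
--             cur = root
--         else:
--             cur = cur[c]
--     return res
-- ===== SOURCE B (Python) =====
-- from typing import List
--
-- def partitionString2(s: str) -> List[str]:
--     res = []
--     seen = set()
--     cur = ""
--     for c in s: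
--         cur += c
--         if cur not in seen:
--             seen.add(cur)
--             res.append(cur)
--             cur = ""
--     return res
-- ===== Notes on version B (the rewrite author's own statement) =====
-- stated objective: simpler
-- what changed: Replaces the nested-dict trie and the left/index slicing with a plain set of already-emitted segments and a growing accumulator string: a segment is emitted exactly when the accumulator has not been emitted before.
import Mathlib
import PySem

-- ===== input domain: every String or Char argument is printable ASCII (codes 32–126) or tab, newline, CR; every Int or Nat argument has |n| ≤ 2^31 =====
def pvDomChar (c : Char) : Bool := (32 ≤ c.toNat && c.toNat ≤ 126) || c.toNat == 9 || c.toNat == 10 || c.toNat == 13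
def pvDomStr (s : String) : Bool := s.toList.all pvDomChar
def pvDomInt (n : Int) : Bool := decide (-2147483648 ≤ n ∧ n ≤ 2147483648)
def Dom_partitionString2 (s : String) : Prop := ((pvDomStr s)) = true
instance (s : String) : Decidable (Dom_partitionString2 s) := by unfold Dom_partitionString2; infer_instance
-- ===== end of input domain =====

-- B replaces A's nested-dict trie and index slicing by a set of the already-emitted
-- segments plus an accumulator string (simpler); same return value on all inputs.

-- ===== PORT A =====
-- Python's nested dicts of dicts form a trie; a node's children dict {} is encoded as a
-- left-child/right-sibling chain (the children association list spelled out as one inductive).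
inductive Trie where
  | nil : Trie
  | cons : Char → Trie → Trie → Trie
deriving DecidableEq, Repr

def trieChild : Trie → Char → Option Trie
  | .nil, _ => none
  | .cons c' u rest, c => if c' = c then some u else trieChild rest c

def triePath : Trie → List Char → Bool
  | _, [] => true
  | t, c :: p =>
    match trieChild t c with
    | none => false
    | some u => triePath u p

def trieAdd (t : Trie) (p : List Char) : Trie :=
  match t, p with
  | t, [] => t
  | .nil, c :: p => .cons c (trieAdd .nil p) .nil
  | .cons c' u rest, c :: p =>
      if c' = c then .cons c' (trieAdd u p) rest
      else .cons c' u (trieAdd rest (c :: p))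
termination_by (p.length, sizeOf t)

-- Python's `cur` is a POINTER into the mutable trie root; here it is modeled by its path
-- `cur` of characters from the root, so `c not in cur` is ¬ triePath root (cur ++ [c]) and
-- the mutation `cur[c] = {}` is trieAdd root (cur ++ [c]).  One loop step of A:
def pvStepA (s : String) (st : List String × Int × Trie × List Char) (ic : Int × Char) :
    List String × Int × Trie × List Char :=
  let (res, left, root, cur) := st
  let (i, c) := ic
  if ¬ triePath root (cur ++ [c]) then
    (res ++ [PySem.Str.slice s (some left) (some (i + 1))], i + 1,
     trieAdd root (cur ++ [c]), [])
  else
    (res, left, root, cur ++ [c])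

def partitionString2 (s : String) : List String :=
  (List.foldl (pvStepA s) ([], 0, Trie.nil, []) (PySem.List.enumerate s.toList 0)).1

-- ===== PORT B =====
-- one loop step of B: grow cur by c; emit iff cur has never been emitted before
def pvStepB (st : List String × PySem.Set String × List Char) (c : Char) :
    List String × PySem.Set String × List Char :=
  let (res, seen, cur) := st
  let cur' := cur ++ [c]
  if ¬ PySem.Set.contains seen (String.ofList cur') then
    (res ++ [String.ofList cur'], PySem.Set.add seen (String.ofList cur'), [])
  else
    (res, seen, cur')

def partitionString2_alt (s : String) : List String :=
  (List.foldl pvStepB ([], PySem.Set.empty, []) s.toList).1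

-- ===== PRECONDITION & SPEC =====
def Spec_partitionString2 (s : String) (out : List String) : Prop := out = partitionString2_alt s
instance (s : String) (out : List String) : Decidable (Spec_partitionString2 s out) := by unfold Spec_partitionString2; infer_instance

-- ===== CLAIM (what is proved, stated in full; the proofs are below) =====
def Claim_equal_partitionString2 : Prop := ∀ (s : String), Dom_partitionString2 s → Spec_partitionString2 s (partitionString2 s)

-- ===== LEMMAS AND PROOFS =====

lemma triePath_skip (c' c : Char) (u rest : Trie) (p : List Char) (h : c' ≠ c) :
    triePath (.cons c' u rest) (c :: p) = triePath rest (c :: p) := by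
  simp [triePath, trieChild, h]

lemma triePath_hit (c : Char) (u rest : Trie) (p : List Char) :
    triePath (.cons c u rest) (c :: p) = triePath u p := by
  simp [triePath, trieChild]

lemma triePath_trieAdd (t : Trie) (q : List Char) :
    ∀ p : List Char, triePath (trieAdd t q) p = (triePath t p || decide (p <+: q)) := by
  induction t, q using trieAdd.induct with
  | case1 t =>
    intro p
    cases p with
    | nil => simp [triePath]
    | cons c p => simp [trieAdd, triePath]
  | case2 c q ih =>
    intro p
    cases p with
    | nil => simp [triePath]
    | cons c'' p' =>
      by_cases hc : c = c''
      · subst hc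
        rw [trieAdd, triePath_hit, ih, triePath]
        cases p' with
        | nil => simp [triePath]
        | cons d p'' => simp [trieChild, triePath, List.cons_prefix_cons]
      · rw [trieAdd, triePath_skip _ _ _ _ _ hc, triePath]
        simp [trieChild, List.cons_prefix_cons, Ne.symm hc]
  | case3 u rest c q ih =>
    intro p
    cases p with
    | nil => simp [triePath]
    | cons c'' p' =>
      by_cases hc : c = c''
      · subst hc
        rw [trieAdd, if_pos rfl, triePath_hit, triePath_hit, ih]
        simp [List.cons_prefix_cons]
      · rw [trieAdd, if_pos rfl, triePath_skip _ _ _ _ _ hc, triePath_skip _ _ _ _ _ hc]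
        simp [List.cons_prefix_cons, Ne.symm hc]
  | case4 c2 u rest c q hcc ih =>
    intro p
    cases p with
    | nil => simp [triePath]
    | cons c'' p' =>
      by_cases hc : c2 = c''
      · subst hc
        rw [trieAdd, if_neg hcc, triePath_hit, triePath_hit]
        simp [List.cons_prefix_cons, hcc]
      · rw [trieAdd, if_neg hcc, triePath_skip _ _ _ _ _ hc, triePath_skip _ _ _ _ _ hc, ih]

lemma take_succ_concat (l : List Char) (k : Nat) (h : k < l.length) :
    l.take k ++ [l[k]] = l.take (k + 1) := by
  rw [List.take_add_one, List.getElem?_eq_getElem h]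
  rfl

lemma pv_main (s : String) :
    ∀ (t : List Char) (n left : Nat) (res : List String) (root : Trie)
      (seen : PySem.Set String),
      left ≤ n → t = s.toList.drop n →
      (∀ p : List Char, p ≠ [] →
        (triePath root p = true ↔ PySem.Set.contains seen (String.ofList p) = true)) →
      (∀ k : Nat, 0 < k → k ≤ n - left →
        PySem.Set.contains seen (String.ofList ((s.toList.drop left).take k)) = true) →
      (List.foldl (pvStepA s) (res, (left : Int), root, (s.toList.drop left).take (n - left))
          (PySem.List.enumerate t n)).1
        = (List.foldl pvStepB (res, seen, (s.toList.drop left).take (n - left)) t).1 := by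
  intro t
  induction t with
  | nil => intro n left res root seen _ _ _ _; simp [PySem.List.enumerate]
  | cons c t' ih =>
    intro n left res root seen hln ht inv1 inv2
    have hn : n < s.toList.length := by
      by_contra h
      rw [List.drop_eq_nil_of_le (by omega)] at ht
      exact absurd ht (by simp)
    have hdrop : s.toList.drop n = s.toList[n] :: s.toList.drop (n + 1) :=
      List.drop_eq_getElem_cons hn
    rw [← ht] at hdrop
    -- relate head and tail
    obtain ⟨hc0, ht'⟩ : c = s.toList[n] ∧ t' = s.toList.drop (n + 1) := by
      injection hdrop with h1 h2; exact ⟨h1, h2⟩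
    have hc : s.toList[n] = c := hc0.symm
    set cur := (s.toList.drop left).take (n - left) with hcur
    have hlen : n - left < (s.toList.drop left).length := by
      rw [List.length_drop]; omega
    have hkey : cur ++ [c] = (s.toList.drop left).take (n - left + 1) := by
      rw [hcur, ← take_succ_concat _ _ hlen]
      congr 1
      rw [List.getElem_drop]
      have : left + (n - left) = n := by omega
      simp only [this, hc]
    have hslice : PySem.Str.slice s (some (left : Int)) (some ((n : Int) + 1))
        = String.ofList (cur ++ [c]) := by
      have : (PySem.Str.slice s (some (left : Int)) (some ((n : Int) + 1))).toList
          = cur ++ [c] := by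
        rw [PySem.Str.toList_slice, PySem.Chars.slice_eq_listSlice]
        rw [show ((n : Int) + 1) = ((n + 1 : Nat) : Int) by push_cast; ring]
        rw [PySem.List.slice_natCast, hkey]
        congr 1
        omega
      rw [← this, String.ofList_toList]
    rw [PySem.List.enumerate_cons]
    rw [List.foldl_cons, List.foldl_cons]
    by_cases hmem : PySem.Set.contains seen (String.ofList (cur ++ [c])) = true
    · -- segment seen before: both just extend cur
      have hpath : triePath root (cur ++ [c]) = true := (inv1 _ (by simp)).mpr hmem
      rw [show pvStepA s (res, (left : Int), root, cur) ((n : Int), c)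
            = (res, (left : Int), root, cur ++ [c]) from by
            simp only [pvStepA]; exact if_neg (not_not_intro hpath)]
      rw [show pvStepB (res, seen, cur) c = (res, seen, cur ++ [c]) from by
            simp only [pvStepB]; exact if_neg (not_not_intro hmem)]
      rw [hkey, show (n : Int) + 1 = ((n + 1 : Nat) : Int) by push_cast; ring,
          show n - left + 1 = n + 1 - left by omega]
      exact ih (n + 1) left res root seen (by omega) ht' inv1
        (by
          intro k hk hk'
          rcases Nat.lt_or_ge k (n - left + 1) with h | h
          · rcases Nat.lt_or_ge k (n - left) with h2 | h2
            · exact inv2 k hk (by omega)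
            · have : k = n - left := by omega
              subst this
              rcases Nat.eq_zero_or_pos (n - left) with h3 | h3
              · omega
              · exact inv2 _ hk (le_refl _)
          · have : k = n + 1 - left := by omega
            subst this
            rw [show n + 1 - left = n - left + 1 by omega, ← hkey]
            exact hmem)
    · -- new segment: both emit
      have hpath : ¬ triePath root (cur ++ [c]) = true := fun h => hmem ((inv1 _ (by simp)).mp h)
      rw [show pvStepA s (res, (left : Int), root, cur) ((n : Int), c)
            = (res ++ [PySem.Str.slice s (some (left : Int)) (some ((n : Int) + 1))],
               (n : Int) + 1, trieAdd root (cur ++ [c]), []) from by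
            simp only [pvStepA]; exact if_pos hpath]
      rw [show pvStepB (res, seen, cur) c
            = (res ++ [String.ofList (cur ++ [c])],
               PySem.Set.add seen (String.ofList (cur ++ [c])), []) from by
            simp only [pvStepB]; exact if_pos hmem]
      rw [hslice, show (n : Int) + 1 = ((n + 1 : Nat) : Int) by push_cast; ring]
      have hinv1' : ∀ p : List Char, p ≠ [] →
          (triePath (trieAdd root (cur ++ [c])) p = true ↔
            PySem.Set.contains (PySem.Set.add seen (String.ofList (cur ++ [c])))
              (String.ofList p) = true) := by
        intro p hp
        rw [triePath_trieAdd]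
        constructor
        · intro h
          rcases Bool.or_eq_true_iff.mp h with h | h
          · have := (inv1 p hp).mp h
            rw [PySem.Set.contains_iff] at this ⊢
            rw [PySem.Set.mem_add]
            exact Or.inl this
          · have hpre : p <+: cur ++ [c] := of_decide_eq_true h
            rcases List.prefix_concat_iff.mp hpre with h | h
            · subst h
              rw [PySem.Set.contains_iff, PySem.Set.mem_add]
              exact Or.inr rfl
            · -- proper nonempty prefix of cur was emitted earlier (inv2)
              have hple : p.length ≤ n - left := by
                have h2 := List.IsPrefix.length_le h
                rw [hcur, List.length_take] at h2
                omega
              have hpl : p = (s.toList.drop left).take p.length := by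
                have h1 : p = cur.take p.length := List.prefix_iff_eq_take.mp h
                have h2 : cur.take p.length = (s.toList.drop left).take p.length := by
                  rw [hcur, List.take_take, Nat.min_eq_left hple]
                exact h1.trans h2
              have hplen : 0 < p.length := List.length_pos_iff.mpr hp
              rw [PySem.Set.contains_iff, PySem.Set.mem_add]
              refine Or.inl ?_
              rw [← PySem.Set.contains_iff, hpl]
              exact inv2 _ hplen hple
        · intro h
          rw [PySem.Set.contains_iff, PySem.Set.mem_add] at h
          rcases h with h | h
          · rw [← PySem.Set.contains_iff] at h
            rw [(inv1 p hp).mpr h]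
            simp
          · have : p = cur ++ [c] := by
              have := congrArg String.toList h
              simpa using this
            subst this
            simp
      have hmain := ih (n + 1) (n + 1) (res ++ [String.ofList (cur ++ [c])])
        (trieAdd root (cur ++ [c])) (PySem.Set.add seen (String.ofList (cur ++ [c])))
        (le_refl _) ht' hinv1'
        (by intro k hk hk'; exact absurd hk' (by omega))
      simpa using hmain

-- ===== VERDICT (by name: the statement is the Claim_ definition above) =====
theorem partitionString2_spec : Claim_equal_partitionString2 := by
  intro s _
  unfold Spec_partitionString2 partitionString2 partitionString2_alt
  have h := pv_main s s.toList 0 0 [] Trie.nil PySem.Set.empty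
    (le_refl 0) rfl
    (by intro p hp; constructor
        · intro h; cases p with
          | nil => exact absurd rfl hp
          | cons c p => simp [triePath, trieChild] at h
        · intro h; simp [PySem.Set.empty, PySem.Set.contains] at h)
    (by intro k hk hk'; exact absurd hk' (by omega))
  simpa using h
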